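-- pv_equiv track=rewrite | github.com/LorenzoGuideri/Algorithms-and-Data-Structures | 17_03.py | sort_evens_odds
-- ===== SOURCE A (Python) =====
-- def sort_evens_odds(A):
--     A.sort()
--     working = False
--     for n in range(len(A)-1, 0, -1):
--         for i in range(n):
--             if A[i]%2 and not A[i + 1]%2:
--                 working = True
--                 A[i], A[i + 1] = A[i + 1], A[i]
--         if not working:
--             break
--     return A
-- ===== SOURCE B (Python) =====
-- def sort_evens_odds(A):
--     evens = sorted(x for x in A if x % 2 == 0)
--     odds = sorted(x for x in A if x % 2 != 0)
--     A[:] = evens + odds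
--     return A
-- ===== Notes on version B (the rewrite author's own statement) =====
-- stated objective: faster
-- what changed: Replaces A's sort-then-bubble-odds-past-evens (nested quadratic passes) with partition by parity, sort each part, concatenate, assigned back in place.
import Mathlib
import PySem

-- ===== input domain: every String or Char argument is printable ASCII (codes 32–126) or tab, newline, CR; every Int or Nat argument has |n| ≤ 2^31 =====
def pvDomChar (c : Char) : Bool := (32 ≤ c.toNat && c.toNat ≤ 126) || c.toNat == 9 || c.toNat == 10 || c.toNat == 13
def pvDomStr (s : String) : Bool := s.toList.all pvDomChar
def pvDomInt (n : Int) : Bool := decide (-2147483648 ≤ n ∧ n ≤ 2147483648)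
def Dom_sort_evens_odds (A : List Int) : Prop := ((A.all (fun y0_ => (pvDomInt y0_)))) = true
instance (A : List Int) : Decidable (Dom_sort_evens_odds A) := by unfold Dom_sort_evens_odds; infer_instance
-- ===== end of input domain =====

-- B partitions by parity, sorts each part and concatenates, instead of A's sort-then-bubble
-- quadratic passes; in Python both mutate the argument list in place — the equivalence proved
-- here is about the return value.


-- ===== PORT A =====
-- one step of the inner loop body: 'if A[i]%2 and not A[i+1]%2: working = True; A[i], A[i+1] = A[i+1], A[i]'
-- (i comes from range(n), so it is nonnegative and both reads are in range; .set with i.toNat is exact there)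
def pvInner (st : List Int × Bool) (i : Int) : List Int × Bool :=
  match PySem.List.pyGet? st.1 i, PySem.List.pyGet? st.1 (i + 1) with
  | some a, some b =>
      if PySem.Int.mod a 2 ≠ 0 ∧ PySem.Int.mod b 2 = 0 then
        (((st.1.set i.toNat b).set (i.toNat + 1) a), true)
      else st
  | _, _ => st

-- the outer 'for n in range(len(A)-1, 0, -1)' loop with its 'if not working: break'
def pvOuter : List Int → List Int → Bool → List Int
  | [], l, _ => l
  | n :: rest, l, w =>
      let p := (PySem.List.pyRange 0 n 1).foldl pvInner (l, w)
      if p.2 = false then p.1 else pvOuter rest p.1 p.2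

def sort_evens_odds (A : List Int) : List Int :=
  let A1 := PySem.List.sorted A (fun x => x) false
  pvOuter (PySem.List.pyRange ((A1.length : Int) - 1) 0 (-1)) A1 false

-- ===== PORT B =====
def sort_evens_odds_alt (A : List Int) : List Int :=
  let evens := PySem.List.sorted (A.filter (fun x => PySem.Int.mod x 2 == 0)) (fun x => x) false
  let odds := PySem.List.sorted (A.filter (fun x => !(PySem.Int.mod x 2 == 0))) (fun x => x) false
  evens ++ odds

-- ===== PRECONDITION & SPEC =====
def Spec_sort_evens_odds (A : List Int) (out : List Int) : Prop := out = sort_evens_odds_alt A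
instance (A : List Int) (out : List Int) : Decidable (Spec_sort_evens_odds A out) := by unfold Spec_sort_evens_odds; infer_instance

-- ===== CLAIM (what is proved, stated in full; the proofs are below) =====
def Claim_equal_sort_evens_odds : Prop := ∀ (A : List Int), Dom_sort_evens_odds A → Spec_sort_evens_odds A (sort_evens_odds A)

-- ===== LEMMAS AND PROOFS =====

-- the even-test of both programs, as a Bool
def pvEV (x : Int) : Bool := PySem.Int.mod x 2 == 0

lemma pvEV_true_iff (x : Int) : pvEV x = true ↔ PySem.Int.mod x 2 = 0 := by
  simp only [pvEV, beq_iff_eq]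

lemma pvEV_false_iff (x : Int) : pvEV x = false ↔ PySem.Int.mod x 2 ≠ 0 := by
  simp only [pvEV, beq_eq_false_iff_ne, ne_eq]

-- recursive form of one inner pass over indices 0..n-1: the list after the pass, and whether a swap happened
def pvPass : Nat → List Int → List Int × Bool
  | 0, l => (l, false)
  | n + 1, x :: y :: t =>
      if PySem.Int.mod x 2 ≠ 0 ∧ PySem.Int.mod y 2 = 0 then
        ((y :: (pvPass n (x :: t)).1), true)
      else
        ((x :: (pvPass n (y :: t)).1), (pvPass n (y :: t)).2)
  | _ + 1, l => (l, false)


lemma pvPass_swap (n : Nat) (x y : Int) (t : List Int)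
    (hc : PySem.Int.mod x 2 ≠ 0 ∧ PySem.Int.mod y 2 = 0) :
    pvPass (n + 1) (x :: y :: t) = (y :: (pvPass n (x :: t)).1, true) := by
  simp only [pvPass, if_pos hc]

lemma pvPass_noswap_step (n : Nat) (x y : Int) (t : List Int)
    (hc : ¬ (PySem.Int.mod x 2 ≠ 0 ∧ PySem.Int.mod y 2 = 0)) :
    pvPass (n + 1) (x :: y :: t) = (x :: (pvPass n (y :: t)).1, (pvPass n (y :: t)).2) := by
  simp only [pvPass, if_neg hc]

-- "no odd immediately before an even": the lists a bubble pass leaves unchanged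
def pvNoOE (l : List Int) : Prop :=
  List.IsChain (fun a b => ¬ (PySem.Int.mod a 2 ≠ 0 ∧ PySem.Int.mod b 2 = 0)) l

lemma pvInner_nil (w : Bool) (i : Int) : pvInner ([], w) i = ([], w) := by
  have h : PySem.List.pyGet? ([] : List Int) i = none := by
    rw [PySem.List.pyGet?_eq_none_iff]
    intro ⟨h1, h2⟩; simp at h1 h2; omega
  simp [pvInner, h]

lemma pvInner_single (x : Int) (w : Bool) (i : Int) (hi : 0 ≤ i) :
    pvInner ([x], w) i = ([x], w) := by
  have h : PySem.List.pyGet? ([x] : List Int) (i + 1) = none := by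
    rw [PySem.List.pyGet?_eq_none_iff]
    intro ⟨h1, h2⟩; simp at h2; omega
  cases hg : PySem.List.pyGet? ([x] : List Int) i <;> simp [pvInner, h, hg]

lemma pvInner_shift (a : Int) (t : List Int) (w : Bool) (i : Int) (hi : 0 ≤ i) :
    pvInner (a :: t, w) (i + 1) = ((pvInner (t, w) i).1.cons a, (pvInner (t, w) i).2) := by
  have h1 : PySem.List.pyGet? (a :: t) (i + 1) = PySem.List.pyGet? t i := by
    rw [PySem.List.pyGet?_of_nonneg _ (by omega), PySem.List.pyGet?_of_nonneg _ hi]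
    have : (i + 1).toNat = i.toNat + 1 := by omega
    simp [this]
  have h2 : PySem.List.pyGet? (a :: t) (i + 1 + 1) = PySem.List.pyGet? t (i + 1) := by
    rw [PySem.List.pyGet?_of_nonneg _ (by omega), PySem.List.pyGet?_of_nonneg _ (by omega)]
    have : (i + 1 + 1).toNat = (i + 1).toNat + 1 := by omega
    simp [this]
  have h3 : (i + 1).toNat = i.toNat + 1 := by omega
  simp only [pvInner, h1, h2, h3]
  cases PySem.List.pyGet? t i <;> cases PySem.List.pyGet? t (i + 1) <;> simp
  split <;> simp

lemma pvFold_shift (is : List Int) (hnn : ∀ i ∈ is, 0 ≤ i) (a : Int) (t : List Int) (w : Bool) :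
    ((is.map (· + 1)).foldl pvInner (a :: t, w)) =
      (a :: (is.foldl pvInner (t, w)).1, (is.foldl pvInner (t, w)).2) := by
  induction is generalizing t w with
  | nil => simp
  | cons i rest ih =>
      have hi : 0 ≤ i := hnn i (by simp)
      have hrest : ∀ j ∈ rest, 0 ≤ j := fun j hj => hnn j (by simp [hj])
      simp only [List.map_cons, List.foldl_cons, pvInner_shift a t w i hi]
      exact ih hrest _ _

lemma pvRange_shift (n : Nat) :
    PySem.List.pyRange 1 ((n : Int) + 1) 1 = (PySem.List.pyRange 0 (n : Int) 1).map (· + 1) := by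
  rw [PySem.List.pyRange_one, PySem.List.pyRange_one]
  have h1 : ((n : Int) + 1 - 1).toNat = n := by omega
  have h2 : ((n : Int) - 0).toNat = n := by omega
  rw [h1, h2, List.map_map]
  exact List.map_congr_left (fun k _ => by simp; ring)

lemma pvFold_const (is : List Int) (st : List Int × Bool)
    (h : ∀ i ∈ is, pvInner st i = st) : is.foldl pvInner st = st := by
  induction is with
  | nil => rfl
  | cons i rest ih =>
      simp only [List.foldl_cons, h i (by simp)]
      exact ih (fun j hj => h j (by simp [hj]))

lemma pvBridge (n : Nat) (l : List Int) (w : Bool) :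
    (PySem.List.pyRange 0 (n : Int) 1).foldl pvInner (l, w) =
      ((pvPass n l).1, w || (pvPass n l).2) := by
  induction n generalizing l w with
  | zero => simp [PySem.List.pyRange_one_eq_nil (by omega : (0:Int) ≤ 0), pvPass]
  | succ n ih =>
      rw [show ((n + 1 : Nat) : Int) = (n : Int) + 1 by push_cast; ring]
      rw [PySem.List.pyRange_one_cons (by omega : (0:Int) < (n:Int) + 1)]
      rw [show ((0:Int) + 1) = 1 by ring, pvRange_shift n]
      match l with
      | [] =>
          simp only [List.foldl_cons, pvInner_nil]
          rw [pvFold_const _ _ (fun i _ => pvInner_nil w i)]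
          simp [pvPass]
      | [x] =>
          simp only [List.foldl_cons, pvInner_single x w 0 (by omega)]
          rw [pvFold_const _ _ (fun i hi => by
            obtain ⟨j, hj', rfl⟩ := List.mem_map.1 hi
            have := (PySem.List.mem_pyRange_one).1 hj'
            exact pvInner_single x w (j + 1) (by omega))]
          simp [pvPass]
      | x :: y :: t =>
          have hg0 : PySem.List.pyGet? (x :: y :: t) (0:Int) = some x :=
            PySem.List.pyGet?_zero_cons x (y :: t)
          have hg1 : PySem.List.pyGet? (x :: y :: t) ((0:Int) + 1) = some y := by
            rw [PySem.List.pyGet?_of_nonneg _ (by omega)]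
            rfl
          have hnn : ∀ i ∈ PySem.List.pyRange 0 (n:Int) 1, 0 ≤ i := by
            intro i hi
            have := (PySem.List.mem_pyRange_one).1 hi
            omega
          simp only [List.foldl_cons]
          by_cases hc : PySem.Int.mod x 2 ≠ 0 ∧ PySem.Int.mod y 2 = 0
          · have hstep : pvInner (x :: y :: t, w) 0 = (y :: x :: t, true) := by
              simp only [pvInner, hg0, hg1, if_pos hc]
              rfl
            rw [hstep, pvFold_shift _ hnn, ih, pvPass_swap n x y t hc]
            simp
          · have hstep : pvInner (x :: y :: t, w) 0 = (x :: y :: t, w) := by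
              simp only [pvInner, hg0, hg1, if_neg hc]
            rw [hstep, pvFold_shift _ hnn, ih, pvPass_noswap_step n x y t hc]

lemma pvPass_length (n : Nat) (l : List Int) : (pvPass n l).1.length = l.length := by
  induction n generalizing l with
  | zero => rfl
  | succ n ih =>
      match l with
      | [] => rfl
      | [x] => rfl
      | x :: y :: t =>
          by_cases hc : PySem.Int.mod x 2 ≠ 0 ∧ PySem.Int.mod y 2 = 0
          · rw [pvPass_swap n x y t hc]; simp [ih]
          · rw [pvPass_noswap_step n x y t hc]; simp [ih]

lemma pvPass_filter_even (n : Nat) (l : List Int) :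
    (pvPass n l).1.filter pvEV = l.filter pvEV := by
  induction n generalizing l with
  | zero => rfl
  | succ n ih =>
      match l with
      | [] => rfl
      | [x] => rfl
      | x :: y :: t =>
          by_cases hc : PySem.Int.mod x 2 ≠ 0 ∧ PySem.Int.mod y 2 = 0
          · have hx : pvEV x = false := (pvEV_false_iff x).2 hc.1
            have hy : pvEV y = true := (pvEV_true_iff y).2 hc.2
            rw [pvPass_swap n x y t hc]
            simp only [List.filter_cons, hx, hy, ih (x :: t)]
            simp [List.filter_cons, hx]
          · rw [pvPass_noswap_step n x y t hc]
            simp only [List.filter_cons, ih (y :: t)]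

lemma pvPass_filter_odd (n : Nat) (l : List Int) :
    (pvPass n l).1.filter (fun x => !pvEV x) = l.filter (fun x => !pvEV x) := by
  induction n generalizing l with
  | zero => rfl
  | succ n ih =>
      match l with
      | [] => rfl
      | [x] => rfl
      | x :: y :: t =>
          by_cases hc : PySem.Int.mod x 2 ≠ 0 ∧ PySem.Int.mod y 2 = 0
          · have hx : pvEV x = false := (pvEV_false_iff x).2 hc.1
            have hy : pvEV y = true := (pvEV_true_iff y).2 hc.2
            rw [pvPass_swap n x y t hc]
            simp only [List.filter_cons, hx, hy, ih (x :: t)]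
            simp [List.filter_cons, hx]
          · rw [pvPass_noswap_step n x y t hc]
            simp only [List.filter_cons, ih (y :: t)]

lemma pvPass_noswap (n : Nat) (l : List Int) (h : (pvPass n l).2 = false) :
    (pvPass n l).1 = l := by
  induction n generalizing l with
  | zero => rfl
  | succ n ih =>
      match l with
      | [] => rfl
      | [x] => rfl
      | x :: y :: t =>
          by_cases hc : PySem.Int.mod x 2 ≠ 0 ∧ PySem.Int.mod y 2 = 0
          · rw [pvPass_swap n x y t hc] at h
            simp at h
          · rw [pvPass_noswap_step n x y t hc] at h ⊢
            simp [ih (y :: t) h]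

lemma pvPass_false_chain (n : Nat) (l : List Int) (hl : l.length ≤ n + 1)
    (h : (pvPass n l).2 = false) : pvNoOE l := by
  induction n generalizing l with
  | zero =>
      match l with
      | [] => exact List.isChain_nil
      | [x] => exact List.isChain_singleton x
      | x :: y :: t => simp at hl
  | succ n ih =>
      match l with
      | [] => exact List.isChain_nil
      | [x] => exact List.isChain_singleton x
      | x :: y :: t =>
          by_cases hc : PySem.Int.mod x 2 ≠ 0 ∧ PySem.Int.mod y 2 = 0
          · rw [pvPass_swap n x y t hc] at h
            simp at h
          · rw [pvPass_noswap_step n x y t hc] at h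
            have := ih (y :: t) (by simp at hl ⊢; omega) h
            exact List.isChain_cons_cons.2 ⟨hc, this⟩

lemma pvNoOE_fix (n : Nat) (l : List Int) (h : pvNoOE l) : pvPass n l = (l, false) := by
  induction n generalizing l with
  | zero => rfl
  | succ n ih =>
      match l with
      | [] => rfl
      | [x] => rfl
      | x :: y :: t =>
          have hc : ¬ (PySem.Int.mod x 2 ≠ 0 ∧ PySem.Int.mod y 2 = 0) :=
            (List.isChain_cons_cons.1 h).1
          rw [pvPass_noswap_step n x y t hc, ih (y :: t) (List.isChain_cons_cons.1 h).2]

lemma pvNoOE_allodd (x : Int) (t : List Int) (hx : pvEV x = false)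
    (h : pvNoOE (x :: t)) : ∀ y ∈ t, pvEV y = false := by
  induction t generalizing x with
  | nil => simp
  | cons y t ih =>
      have h1 := (List.isChain_cons_cons.1 h).1
      have h2 := (List.isChain_cons_cons.1 h).2
      have hy : pvEV y = false := by
        by_contra hy
        exact h1 ⟨(pvEV_false_iff x).1 hx, (pvEV_true_iff y).1 (by simpa using hy)⟩
      intro z hz
      rcases hz with _ | hz
      · exact hy
      · exact ih y hy h2 z (by assumption)

lemma pvNoOE_part (l : List Int) (h : pvNoOE l) :
    l.filter pvEV ++ l.filter (fun x => !pvEV x) = l := by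
  induction l with
  | nil => rfl
  | cons x t ih =>
      by_cases hx : pvEV x = true
      · have := ih h.tail
        simp [List.filter_cons, hx, this]
      · have hx' : pvEV x = false := by simpa using hx
        have hall : ∀ y ∈ t, pvEV y = false := pvNoOE_allodd x t hx' h
        have h1 : (x :: t).filter pvEV = [] := by
          rw [List.filter_eq_nil_iff]
          intro y hy
          rcases hy with _ | hy
          · simp [hx']
          · simp [hall y (by assumption)]
        have h2 : (x :: t).filter (fun x => !pvEV x) = x :: t := by
          rw [List.filter_eq_self]
          intro y hy
          rcases hy with _ | hy
          · simp [hx']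
          · simp [hall y (by assumption)]
        simp [h1, h2]

lemma pvPass_splitN (N : Nat) : ∀ c d : List Int, c.length ≤ N → c ≠ [] →
    pvPass (c.length - 1) (c ++ d) =
      ((pvPass (c.length - 1) c).1 ++ d, (pvPass (c.length - 1) c).2) := by
  induction N with
  | zero =>
      intro c d hlen hne
      match c with
      | [] => exact absurd rfl hne
      | x :: t => simp at hlen
  | succ N ih =>
      intro c d hlen hne
      match c with
      | [a] => simp [pvPass]
      | a :: b :: c'' =>
          simp only [List.length_cons, Nat.add_sub_cancel, List.cons_append]
          by_cases hcond : PySem.Int.mod a 2 ≠ 0 ∧ PySem.Int.mod b 2 = 0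
          · rw [pvPass_swap _ _ _ _ hcond, pvPass_swap _ _ _ _ hcond]
            have := ih (a :: c'') d (by simp at hlen ⊢; omega) (by simp)
            simp only [List.length_cons, Nat.add_sub_cancel, List.cons_append] at this
            simp [this]
          · rw [pvPass_noswap_step _ _ _ _ hcond, pvPass_noswap_step _ _ _ _ hcond]
            have := ih (b :: c'') d (by simp at hlen ⊢; omega) (by simp)
            simp only [List.length_cons, Nat.add_sub_cancel, List.cons_append] at this
            simp [this]

lemma pvPass_split (c d : List Int) (hne : c ≠ []) :
    pvPass (c.length - 1) (c ++ d) =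
      ((pvPass (c.length - 1) c).1 ++ d, (pvPass (c.length - 1) c).2) :=
  pvPass_splitN c.length c d (le_refl _) hne

lemma pvPass_oddend (N : Nat) : ∀ c : List Int, c.length ≤ N →
    (∃ x ∈ c, pvEV x = false) →
    ∃ c' o, (pvPass (c.length - 1) c).1 = c' ++ [o] ∧ pvEV o = false := by
  induction N with
  | zero =>
      intro c hlen h
      match c with
      | [] => simp at h
      | x :: t => simp at hlen
  | succ N ih =>
      intro c hlen h
      match c with
      | [] => simp at h
      | [x] =>
          obtain ⟨y, hy, hyo⟩ := h
          simp at hy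
          subst hy
          exact ⟨[], y, by simp [pvPass], hyo⟩
      | x :: y :: t =>
          simp only [List.length_cons, Nat.add_sub_cancel]
          by_cases hc : PySem.Int.mod x 2 ≠ 0 ∧ PySem.Int.mod y 2 = 0
          · rw [pvPass_swap _ _ _ _ hc]
            have hx : pvEV x = false := (pvEV_false_iff x).2 hc.1
            obtain ⟨c', o, hco, ho⟩ := ih (x :: t) (by simp at hlen ⊢; omega)
              ⟨x, by simp, hx⟩
            simp only [List.length_cons, Nat.add_sub_cancel] at hco
            exact ⟨y :: c', o, by simp [hco], ho⟩
          · rw [pvPass_noswap_step _ _ _ _ hc]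
            have hodd : ∃ z ∈ y :: t, pvEV z = false := by
              obtain ⟨z, hz, hzo⟩ := h
              rcases hz with _ | hz
              · have hy : pvEV y = false := by
                  by_contra hy
                  exact hc ⟨(pvEV_false_iff x).1 hzo, (pvEV_true_iff y).1 (by simpa using hy)⟩
                exact ⟨y, by simp, hy⟩
              · exact ⟨z, by assumption, hzo⟩
            obtain ⟨c', o, hco, ho⟩ := ih (y :: t) (by simp at hlen ⊢; omega) hodd
            simp only [List.length_cons, Nat.add_sub_cancel] at hco
            exact ⟨x :: c', o, by simp [hco], ho⟩

lemma pvChain_evens_odds (c d : List Int) (hc : ∀ x ∈ c, pvEV x = true)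
    (hd : ∀ x ∈ d, pvEV x = false) : pvNoOE (c ++ d) := by
  induction c with
  | nil =>
      induction d with
      | nil => exact List.isChain_nil
      | cons y d' ihd =>
          refine List.isChain_cons.2 ⟨?_, ?_⟩
          · intro z hz ⟨_, hz2⟩
            have hzf : pvEV z = false := by
              match d' with
              | [] => simp at hz
              | w :: _ =>
                  simp at hz
                  subst hz
                  exact hd w (by simp)
            exact absurd ((pvEV_true_iff z).2 hz2) (by simp [hzf])
          · exact ihd (fun x hx => hd x (by simp [hx]))
  | cons a c' ihc =>
      refine List.isChain_cons.2 ⟨?_, ihc (fun x hx => hc x (by simp [hx]))⟩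
      intro z hz ⟨ha, _⟩
      exact ha ((pvEV_true_iff a).1 (hc a (by simp)))

lemma pvOuter_fix (ns : List Int) (l : List Int) (w : Bool)
    (hnn : ∀ n ∈ ns, 0 ≤ n) (h : pvNoOE l) : pvOuter ns l w = l := by
  induction ns generalizing w with
  | nil => rfl
  | cons n rest ih =>
      have hn : 0 ≤ n := hnn n (by simp)
      have hb := pvBridge n.toNat l w
      rw [Int.toNat_of_nonneg hn] at hb
      rw [pvNoOE_fix n.toNat l h] at hb
      simp only [pvOuter, hb]
      cases w with
      | false => simp
      | true =>
          simp only [Bool.or_false]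
          rw [if_neg (by simp)]
          exact ih true (fun j hj => hnn j (List.mem_cons_of_mem _ hj))

lemma pvOuter_true (m : Nat) : ∀ c d : List Int, c.length = m + 1 →
    (∀ x ∈ d, pvEV x = false) →
    pvOuter (PySem.List.pyRange (m : Int) 0 (-1)) (c ++ d) true =
      (c ++ d).filter pvEV ++ (c ++ d).filter (fun x => !pvEV x) := by
  induction m with
  | zero =>
      intro c d hc hd
      rw [PySem.List.pyRange_neg_one_eq_nil (by omega)]
      match c with
      | [x] =>
          have h : pvNoOE (x :: d) := by
            by_cases hx : pvEV x = true
            · exact pvChain_evens_odds [x] d (by simpa using hx) hd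
            · have := pvChain_evens_odds [] (x :: d)
                (by simp) (fun y hy => by
                  rcases hy with _ | hy
                  · simpa using hx
                  · exact hd y (by assumption))
              simpa using this
          simpa [pvOuter] using (pvNoOE_part (x :: d) h).symm
  | succ m ih =>
      intro c d hc hd
      rw [show ((m + 1 : Nat) : Int) = (m : Int) + 1 by push_cast; ring]
      rw [PySem.List.pyRange_neg_one_cons (by omega : (0:Int) < ((m:Int) + 1))]
      simp only [pvOuter]
      rw [show ((m : Int) + 1) = (((m + 1 : Nat) : Int)) by push_cast; ring,
        pvBridge (m + 1) (c ++ d) true]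
      have hsplit := pvPass_split c d (by intro hnil; simp [hnil] at hc)
      rw [show c.length - 1 = m + 1 by omega] at hsplit
      rw [hsplit]
      rw [if_neg (by simp)]
      rw [show (((m + 1 : Nat) : Int) - 1) = (m : Int) by push_cast; ring]
      have hfe := pvPass_filter_even (m + 1) (c ++ d)
      have hfo := pvPass_filter_odd (m + 1) (c ++ d)
      simp only [hsplit] at hfe hfo
      by_cases hodd : ∃ x ∈ c, pvEV x = false
      · obtain ⟨c'', o, hco, ho⟩ := pvPass_oddend c.length c (le_refl _) hodd
        rw [show c.length - 1 = m + 1 by omega] at hco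
        have hlen'' : c''.length = m + 1 := by
          have := pvPass_length (m + 1) c
          rw [hco] at this
          simp at this
          omega
        have hre : (pvPass (m + 1) c).1 ++ d = c'' ++ (o :: d) := by
          rw [hco]; simp
        rw [hre] at hfe hfo ⊢
        simp only [Bool.true_or]
        rw [ih c'' (o :: d) hlen'' (fun x hx => by
          rcases hx with _ | hx
          · exact ho
          · exact hd x (by assumption))]
        rw [hfe, hfo]
      · have hce : ∀ x ∈ c, pvEV x = true := by
          intro x hx
          by_contra hxx
          exact hodd ⟨x, hx, by simpa using hxx⟩
        have hnoe_c : pvNoOE c := by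
          have := pvChain_evens_odds c [] hce (by simp)
          simpa using this
        rw [pvNoOE_fix (m + 1) c hnoe_c]
        have hnoe : pvNoOE (c ++ d) := pvChain_evens_odds c d hce hd
        rw [pvOuter_fix _ _ _ (fun n hn => by
          have := (PySem.List.mem_pyRange_neg_one).1 hn; omega) hnoe]
        exact (pvNoOE_part (c ++ d) hnoe).symm

-- the whole A-side loop after the initial sort computes the stable parity partition
lemma pvMain (L : List Int) :
    pvOuter (PySem.List.pyRange ((L.length : Int) - 1) 0 (-1)) L false =
      L.filter pvEV ++ L.filter (fun x => !pvEV x) := by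
  by_cases hlen1 : L.length ≤ 1
  · rw [PySem.List.pyRange_neg_one_eq_nil (by omega)]
    have h : pvNoOE L := by
      rcases L with _ | ⟨x, _ | ⟨y, t⟩⟩
      · exact List.isChain_nil
      · exact List.isChain_singleton x
      · simp at hlen1
    simpa [pvOuter] using (pvNoOE_part L h).symm
  · have hlen : 2 ≤ L.length := by omega
    rw [show ((L.length : Int) - 1) = (((L.length - 1 : Nat)) : Int) by omega]
    rw [PySem.List.pyRange_neg_one_cons (by omega : (0:Int) < ((L.length - 1 : Nat) : Int))]
    simp only [pvOuter]
    rw [pvBridge (L.length - 1) L false]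
    cases hf : (pvPass (L.length - 1) L).2 with
    | false =>
        rw [if_pos (by simp [hf])]
        have hch := pvPass_false_chain (L.length - 1) L (by omega) hf
        rw [pvPass_noswap _ _ hf]
        exact (pvNoOE_part L hch).symm
    | true =>
        rw [if_neg (by simp [hf])]
        rw [show ((((L.length - 1 : Nat)) : Int) - 1) = (((L.length - 2 : Nat)) : Int) by omega]
        have hodd : ∃ z ∈ L, pvEV z = false := by
          by_contra hall
          push_neg at hall
          have hce : ∀ z ∈ L, pvEV z = true := fun z hz => by
            have := hall z hz; simpa using this
          have hnoe : pvNoOE L := by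
            have := pvChain_evens_odds L [] hce (by simp)
            simpa using this
          rw [pvNoOE_fix (L.length - 1) L hnoe] at hf
          simp at hf
        obtain ⟨c'', o, hco, ho⟩ := pvPass_oddend L.length L (le_refl _) hodd
        have hlen'' : c''.length = L.length - 2 + 1 := by
          have := pvPass_length (L.length - 1) L
          rw [hco] at this
          simp at this
          omega
        have hfe := pvPass_filter_even (L.length - 1) L
        have hfo := pvPass_filter_odd (L.length - 1) L
        rw [hco] at hfe hfo
        rw [hco]
        simp only [Bool.false_or]
        rw [pvOuter_true (L.length - 2) c'' [o] hlen''
          (fun z hz => by simp at hz; subst hz; exact ho)]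
        rw [hfe, hfo]

lemma pvFilter_sorted (A : List Int) (p : Int → Bool) :
    PySem.List.sorted (A.filter p) (fun x => x) false =
      (PySem.List.sorted A (fun x => x) false).filter p := by
  apply PySem.List.sorted_id_eq_of_perm_of_pairwise
  · exact (PySem.List.sorted_perm A (fun x => x) false).filter p
  · exact (PySem.List.sorted_pairwise A (fun x => x)).filter p

-- ===== VERDICT (by name: the statement is the Claim_ definition above) =====
theorem sort_evens_odds_spec : Claim_equal_sort_evens_odds := by
  intro A _
  show sort_evens_odds A = sort_evens_odds_alt A
  have hEV : (fun x => PySem.Int.mod x 2 == 0) = pvEV := rfl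
  have hOdd : (fun x => !(PySem.Int.mod x 2 == 0)) = (fun x => !pvEV x) := rfl
  simp only [sort_evens_odds, sort_evens_odds_alt, hEV, hOdd]
  rw [pvMain, pvFilter_sorted, pvFilter_sorted]
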